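-- pv_equiv track=rewrite | github.com/FueledByRedBull/crossword | src/pipeline.py | _unique_term_inventory_by_length
-- ===== SOURCE A (Python) =====
-- def _unique_term_inventory_by_length(terms: list[dict]) -> dict[int, int]:
--     by_length: dict[int, set[str]] = {}
--     for term in terms:
--         normalized = (term.get("normalized_answer") or "").strip().upper()
--         if not normalized:
--             continue
--         by_length.setdefault(len(normalized), set()).add(normalized)
--     return {length: len(values) for length, values in by_length.items()}
-- ===== SOURCE B (Python) =====
-- def _unique_term_inventory_by_length(terms: list[dict]) -> dict[int, int]:
--     normalized = [(term.get("normalized_answer") or "").strip().upper() for term in terms]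
--     unique = dict.fromkeys(n for n in normalized if n)  # ordered global dedup
--     counts: dict[int, int] = {}
--     for s in unique:
--         counts[len(s)] = counts.get(len(s), 0) + 1
--     return counts
-- ===== Notes on version B (the rewrite author's own statement) =====
-- stated objective: alternative
-- what changed: A builds a dict mapping length to a set of normalized strings in one guarded loop and then takes set sizes; B instead dedups the non-empty normalized strings into one flat ordered collection and then tallies lengths in a second counting pass over the unique strings only.
import Mathlib
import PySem

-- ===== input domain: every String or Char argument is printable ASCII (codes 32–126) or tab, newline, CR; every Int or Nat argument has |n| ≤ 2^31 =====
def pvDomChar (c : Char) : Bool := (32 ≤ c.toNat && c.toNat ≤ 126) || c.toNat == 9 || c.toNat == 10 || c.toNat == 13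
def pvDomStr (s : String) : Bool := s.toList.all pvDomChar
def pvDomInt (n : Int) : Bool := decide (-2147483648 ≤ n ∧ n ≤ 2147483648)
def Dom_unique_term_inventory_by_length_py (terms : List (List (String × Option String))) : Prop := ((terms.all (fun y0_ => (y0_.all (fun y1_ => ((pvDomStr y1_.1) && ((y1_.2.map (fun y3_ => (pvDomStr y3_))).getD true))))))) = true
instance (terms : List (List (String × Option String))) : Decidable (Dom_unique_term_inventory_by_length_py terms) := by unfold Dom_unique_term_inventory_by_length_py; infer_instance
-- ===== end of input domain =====

-- B replaces A's dict-of-sets with a flat ordered dedup of the normalized strings followed by a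
-- separate length-counting pass over the unique strings (objective: simpler two-phase decomposition).

-- ===== PORT A =====
-- (term.get("normalized_answer") or "").strip().upper()  — shared by both ports verbatim
def pvNorm (term : List (String × Option String)) : String :=
  PySem.Str.upper (PySem.Str.strip (((term.lookup "normalized_answer").join).getD ""))

def unique_term_inventory_by_length_py (terms : List (List (String × Option String))) : List (Int × Int) :=
  let by_length : PySem.Dict Int (PySem.Set String) :=
    terms.foldl (fun d term =>
      let normalized := pvNorm term
      if normalized = "" then d
      else d.modify (PySem.Str.len normalized) PySem.Set.empty (fun s => PySem.Set.add s normalized))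
      PySem.Dict.empty
  by_length.items.map (fun p => (p.1, PySem.Set.len p.2))

-- ===== PORT B =====
def unique_term_inventory_by_length_py_alt (terms : List (List (String × Option String))) : List (Int × Int) :=
  let normalized := terms.map pvNorm
  let unique : List String := PySem.List.dedup (normalized.filter (fun n => n ≠ ""))
  let counts : PySem.Dict Int Int :=
    unique.foldl (fun d s => d.insert (PySem.Str.len s) (d.getD (PySem.Str.len s) 0 + 1)) PySem.Dict.empty
  counts.items

-- ===== PRECONDITION & SPEC =====
def Spec_unique_term_inventory_by_length_py (terms : List (List (String × Option String))) (out : List (Int × Int)) : Prop := out = unique_term_inventory_by_length_py_alt terms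
instance (terms : List (List (String × Option String))) (out : List (Int × Int)) : Decidable (Spec_unique_term_inventory_by_length_py terms out) := by unfold Spec_unique_term_inventory_by_length_py; infer_instance

-- ===== CLAIM (what is proved, stated in full; the proofs are below) =====
def Claim_equal_unique_term_inventory_by_length_py : Prop := ∀ (terms : List (List (String × Option String))), Dom_unique_term_inventory_by_length_py terms → Spec_unique_term_inventory_by_length_py terms (unique_term_inventory_by_length_py terms)

-- ===== LEMMAS AND PROOFS =====

-- A's guarded loop over terms is the plain grouping loop over the non-empty normalized strings.
theorem pv_foldA_filter (l : List (List (String × Option String)))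
    (d : PySem.Dict Int (PySem.Set String)) :
    l.foldl (fun d term =>
        if pvNorm term = "" then d
        else d.modify (PySem.Str.len (pvNorm term)) PySem.Set.empty
          (fun s => PySem.Set.add s (pvNorm term))) d
    = ((l.map pvNorm).filter (fun n => n ≠ "")).foldl
        (fun d n => d.modify (PySem.Str.len n) PySem.Set.empty (fun s => PySem.Set.add s n)) d := by
  induction l generalizing d with
  | nil => rfl
  | cons t l ih =>
    simp only [List.foldl_cons, List.map_cons, List.filter_cons]
    by_cases h : pvNorm t = ""
    · have hd : (decide (pvNorm t ≠ "")) = false := by simp [h]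
      rw [if_pos h, ih, hd, if_neg Bool.false_ne_true]
    · have hd : (decide (pvNorm t ≠ "")) = true := by simp [h]
      rw [if_neg h, hd, if_pos rfl, List.foldl_cons, ih]

-- the set A keeps at key L is the set of the filtered strings of that length
theorem pv_getD_group (ns : List String) (d : PySem.Dict Int (PySem.Set String)) (L : Int) :
    ((ns.foldl (fun d n => d.modify (PySem.Str.len n) PySem.Set.empty (fun s => PySem.Set.add s n)) d).getD L PySem.Set.empty)
    = PySem.Set.update (d.getD L PySem.Set.empty) (ns.filter (fun n => PySem.Str.len n == L)) := by
  induction ns generalizing d with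
  | nil => rfl
  | cons n ns ih =>
    simp only [List.foldl_cons, ih, List.filter_cons, PySem.Dict.getD_modify]
    by_cases h : PySem.Str.len n = L
    · have h1 : (PySem.Str.len n == L) = true := by simp only [beq_iff_eq]; exact h
      rw [h1, if_pos h.symm, if_pos rfl, h, PySem.Set.update_cons]
    · have h1 : (PySem.Str.len n == L) = false := by simp only [beq_eq_false_iff_ne, ne_eq]; exact h
      rw [h1, if_neg (fun e => h e.symm), if_neg Bool.false_ne_true]

-- dedup-then-map and map have the same first occurrences of the mapped values
theorem pv_ofList_map_dedup {α β : Type} [DecidableEq α] [DecidableEq β] (f : α → β) (ns : List α) :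
    PySem.Set.ofList ((PySem.List.dedup ns).map f) = PySem.Set.ofList (ns.map f) := by
  induction ns using List.reverseRecOn with
  | nil => rfl
  | append_singleton ns x ih =>
    rw [PySem.List.dedup_eq_ofList, PySem.Set.ofList_append_singleton, List.map_append,
      List.map_singleton, PySem.Set.ofList_append_singleton]
    rw [PySem.List.dedup_eq_ofList] at ih
    by_cases h : x ∈ ns
    · rw [PySem.Set.add_of_mem (by simpa [PySem.Set.mem_ofList] using h),
        PySem.Set.add_of_mem (by simp [PySem.Set.mem_ofList]; exact ⟨x, h, rfl⟩), ih]
    · rw [PySem.Set.add_of_not_mem (by simpa [PySem.Set.mem_ofList] using h),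
        List.map_append, List.map_singleton, PySem.Set.ofList_append_singleton, ih]

-- building the set of a filtered list is filtering the set
theorem pv_ofList_filter {α : Type} [DecidableEq α] (p : α → Bool) (ns : List α) :
    PySem.Set.ofList (ns.filter p) = (PySem.Set.ofList ns).filter p := by
  induction ns using List.reverseRecOn with
  | nil => rfl
  | append_singleton ns x ih =>
    rw [List.filter_append, PySem.Set.ofList_append_singleton]
    by_cases hp : p x
    · simp only [List.filter_singleton, hp, cond_true]
      rw [PySem.Set.ofList_append_singleton]
      by_cases h : x ∈ ns
      · rw [PySem.Set.add_of_mem (s := PySem.Set.ofList (ns.filter p))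
            (by rw [PySem.Set.mem_ofList]; exact List.mem_filter.mpr ⟨h, hp⟩),
          PySem.Set.add_of_mem (by simpa [PySem.Set.mem_ofList] using h), ih]
      · rw [PySem.Set.add_of_not_mem (s := PySem.Set.ofList (ns.filter p))
            (by rw [PySem.Set.mem_ofList]; intro hx; exact h (List.mem_filter.mp hx).1),
          PySem.Set.add_of_not_mem (by simpa [PySem.Set.mem_ofList] using h),
          List.filter_append, ih]
        simp only [List.filter_singleton, hp, cond_true]
    · have hp' : p x = false := by simpa using hp
      simp only [List.filter_singleton, hp', cond_false, List.append_nil]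
      rw [ih]
      by_cases h : x ∈ ns
      · rw [PySem.Set.add_of_mem (by simpa [PySem.Set.mem_ofList] using h)]
      · rw [PySem.Set.add_of_not_mem (by simpa [PySem.Set.mem_ofList] using h),
          List.filter_append]
        simp only [List.filter_singleton, hp', cond_false, List.append_nil]

-- ===== VERDICT (by name: the statement is the Claim_ definition above) =====
theorem unique_term_inventory_by_length_py_spec : Claim_equal_unique_term_inventory_by_length_py := by
  intro terms _
  unfold Spec_unique_term_inventory_by_length_py
  unfold unique_term_inventory_by_length_py unique_term_inventory_by_length_py_alt
  simp only [pv_foldA_filter]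
  set ns := ((terms.map pvNorm).filter (fun n => n ≠ "")) with hns
  -- B side: the counting loop over the unique strings is Counter of their lengths
  have hB : List.foldl (fun (d : PySem.Dict Int Int) (s : String) =>
        d.insert (PySem.Str.len s) (d.getD (PySem.Str.len s) 0 + 1)) PySem.Dict.empty (PySem.List.dedup ns)
      = PySem.Dict.counter ((PySem.List.dedup ns).map PySem.Str.len) := by
    rw [← PySem.Dict.foldl_insert_getD_add_one_eq_counter, List.foldl_map]
  rw [hB, PySem.Dict.items_counter]
  -- A side: items of the grouping dict, via its keys
  have hnd : ((ns.foldl (fun d n => d.modify (PySem.Str.len n) PySem.Set.empty (fun s => PySem.Set.add s n)) PySem.Dict.empty)).keys.Nodup :=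
    PySem.Dict.nodup_keys_foldl_modify_key ns PySem.Str.len PySem.Set.empty
      (fun _ n s => PySem.Set.add s n) PySem.Dict.empty PySem.Dict.nodup_keys_empty
  rw [PySem.Dict.items_eq_map_keys _ hnd PySem.Set.empty,
    PySem.Dict.keys_foldl_modify_key ns PySem.Str.len PySem.Set.empty
      (fun _ n s => PySem.Set.add s n) PySem.Dict.empty, List.map_map]
  have hupd : PySem.Set.update (PySem.Dict.empty : PySem.Dict Int (PySem.Set String)).keys (ns.map PySem.Str.len)
      = PySem.Set.ofList (ns.map PySem.Str.len) := rfl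
  rw [hupd, pv_ofList_map_dedup PySem.Str.len ns]
  apply List.map_congr_left
  intro L _
  simp only [Function.comp_apply, pv_getD_group, PySem.Dict.getD_empty, Prod.mk.injEq, true_and]
  have hu : PySem.Set.update (PySem.Set.empty : PySem.Set String) (ns.filter (fun n => PySem.Str.len n == L))
      = PySem.Set.ofList (ns.filter (fun n => PySem.Str.len n == L)) := rfl
  rw [hu, pv_ofList_filter, PySem.List.dedup_eq_ofList]
  unfold PySem.Set.len
  rw [List.count_eq_countP, List.countP_map]
  rw [show ((fun x => x == L) ∘ PySem.Str.len) = (fun n => PySem.Str.len n == L) from rfl,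
    List.countP_eq_length_filter]
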